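-- pv_equiv track=rewrite | github.com/WesleyMaycumber/tileGame1 | tileGameMain.py | tilemap_Borders
-- ===== SOURCE A (Python) =====
-- def tilemap_Borders(tilemap):
--     rows = len(tilemap)
--     cols = len(tilemap[0])
--     tilemap2 = []
--
--     for i in range(rows):
--         row = []
--         for j in range(cols):
--             # Get the surrounding tiles with proper bounds checking
--             t1 = str(tilemap[i][j-1]) if j >= 1 else '0'  # Left
--             t2 = str(tilemap[i-1][j]) if i >= 1 else '0'  # Top
--             t3 = str(tilemap[i][j+1]) if j < cols - 1 else '0'  # Right
--             t4 = str(tilemap[i+1][j]) if i < rows - 1 else '0'  # Bottom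
--
--             # Combine tiles into the string
--             tile = f"{t1}{t2}{t3}{t4}"
--
--             # Append to the current row
--             row.append(tile)
--
--         # Append the completed row to tilemap2
--         tilemap2.append(row)
--
--     return tilemap2
-- ===== SOURCE B (Python) =====
-- def tilemap_Borders(tilemap):
--     rows = len(tilemap)
--     cols = len(tilemap[0])
--     pad = ['0'] * (cols + 2)
--     P = ([pad]
--          + [['0'] + [str(tilemap[i][j]) for j in range(cols)] + ['0'] for i in range(rows)]
--          + [pad])
--     return [[P[i + 1][j] + P[i][j + 1] + P[i + 1][j + 2] + P[i + 2][j + 1]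
--              for j in range(cols)]
--             for i in range(rows)]
-- ===== Notes on version B (the rewrite author's own statement) =====
-- stated objective: simpler
-- what changed: Replaces the four per-cell conditional bounds-checked neighbor lookups with a precomputed '0'-padded string grid, so the emission pass is branch-free uniform indexing.
import Mathlib
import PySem

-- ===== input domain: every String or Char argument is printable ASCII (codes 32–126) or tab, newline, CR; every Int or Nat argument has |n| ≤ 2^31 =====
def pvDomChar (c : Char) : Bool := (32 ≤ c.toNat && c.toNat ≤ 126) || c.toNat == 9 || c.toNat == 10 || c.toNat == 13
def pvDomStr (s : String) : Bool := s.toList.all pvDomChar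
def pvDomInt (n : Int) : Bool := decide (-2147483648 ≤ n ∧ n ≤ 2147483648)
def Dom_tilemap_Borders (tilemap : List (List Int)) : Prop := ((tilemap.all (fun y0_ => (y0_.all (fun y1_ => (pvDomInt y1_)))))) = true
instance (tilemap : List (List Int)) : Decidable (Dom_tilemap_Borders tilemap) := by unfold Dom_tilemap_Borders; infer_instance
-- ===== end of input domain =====

-- B builds a '0'-padded string grid once so the emission pass indexes uniformly with no branches (objective: simpler).

-- ===== PORT A =====
-- literal transliteration: per cell, four conditional bounds-checked neighbor lookups
def tilemap_Borders (tilemap : List (List Int)) : List (List String) :=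
  let rows : Int := tilemap.length
  let cols : Int := (PySem.List.pyGetD tilemap 0 ([] : List Int)).length
  (PySem.List.pyRange 0 rows 1).map (fun i =>
    (PySem.List.pyRange 0 cols 1).map (fun j =>
      let t1 := if 1 ≤ j then PySem.Int.toStr (PySem.List.pyGetD (PySem.List.pyGetD tilemap i []) (j - 1) 0) else "0"
      let t2 := if 1 ≤ i then PySem.Int.toStr (PySem.List.pyGetD (PySem.List.pyGetD tilemap (i - 1) []) j 0) else "0"
      let t3 := if j < cols - 1 then PySem.Int.toStr (PySem.List.pyGetD (PySem.List.pyGetD tilemap i []) (j + 1) 0) else "0"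
      let t4 := if i < rows - 1 then PySem.Int.toStr (PySem.List.pyGetD (PySem.List.pyGetD tilemap (i + 1) []) j 0) else "0"
      t1 ++ t2 ++ t3 ++ t4))

-- ===== PORT B =====
-- helpers of B's padded grid
def pvPad (cols : Nat) : List String := List.replicate (cols + 2) "0"

def pvRow (tilemap : List (List Int)) (cols i : Nat) : List String :=
  ["0"] ++ (List.range cols).map (fun j => PySem.Int.toStr ((tilemap.getD i []).getD j 0)) ++ ["0"]

def pvP (tilemap : List (List Int)) (rows cols : Nat) : List (List String) :=
  [pvPad cols] ++ (List.range rows).map (pvRow tilemap cols) ++ [pvPad cols]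

def tilemap_Borders_alt (tilemap : List (List Int)) : List (List String) :=
  let rows := tilemap.length
  let cols := (PySem.List.pyGetD tilemap 0 ([] : List Int)).length
  let P := pvP tilemap rows cols
  (List.range rows).map (fun i =>
    (List.range cols).map (fun j =>
      (P.getD (i + 1) []).getD j "0" ++ (P.getD i []).getD (j + 1) "0" ++
      (P.getD (i + 1) []).getD (j + 2) "0" ++ (P.getD (i + 2) []).getD (j + 1) "0"))

-- ===== PRECONDITION & SPEC =====
-- Pre_ excludes exactly the inputs where the Python raises IndexError: an empty
-- tilemap (len(tilemap[0])) and rows shorter than the first row (both A and B raise there).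
def Pre_tilemap_Borders (tilemap : List (List Int)) : Prop :=
  tilemap ≠ [] ∧ ∀ row ∈ tilemap, (tilemap.headD []).length ≤ row.length
instance (tilemap : List (List Int)) : Decidable (Pre_tilemap_Borders tilemap) := by unfold Pre_tilemap_Borders; infer_instance
def pvWitness_tilemap_Borders : List (List Int) := [[1, 2], [3, 4]]

def Spec_tilemap_Borders (tilemap : List (List Int)) (out : List (List String)) : Prop := out = tilemap_Borders_alt tilemap
instance (tilemap : List (List Int)) (out : List (List String)) : Decidable (Spec_tilemap_Borders tilemap out) := by unfold Spec_tilemap_Borders; infer_instance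

-- ===== CLAIM (what is proved, stated in full; the proofs are below) =====
def Claim_equal_tilemap_Borders : Prop := ∀ (tilemap : List (List Int)), Dom_tilemap_Borders tilemap → Pre_tilemap_Borders tilemap → Spec_tilemap_Borders tilemap (tilemap_Borders tilemap)

-- ===== LEMMAS AND PROOFS =====

theorem pvPad_getD (cols k : Nat) : (pvPad cols).getD k "0" = "0" := by
  unfold pvPad
  simp only [List.getD, List.getElem?_replicate]
  split <;> rfl

theorem pvP_getD_zero (tm : List (List Int)) (rows cols : Nat) :
    (pvP tm rows cols).getD 0 [] = pvPad cols := rfl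

theorem pvP_getD_succ (tm : List (List Int)) (rows cols i : Nat) (h : i < rows) :
    (pvP tm rows cols).getD (i + 1) [] = pvRow tm cols i := by
  show (pvPad cols :: (List.map (pvRow tm cols) (List.range rows) ++ [pvPad cols])).getD (i + 1) [] = pvRow tm cols i
  rw [List.getD_cons_succ, List.getD_append _ _ _ _ (by simpa using h)]
  rw [List.getD_eq_getElem _ _ (by simpa using h)]
  simp

theorem pvP_getD_last (tm : List (List Int)) (rows cols : Nat) :
    (pvP tm rows cols).getD (rows + 1) [] = pvPad cols := by
  show (pvPad cols :: (List.map (pvRow tm cols) (List.range rows) ++ [pvPad cols])).getD (rows + 1) [] = pvPad cols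
  rw [List.getD_cons_succ, List.getD_append_right _ _ _ _ (by simp)]
  simp

theorem pvRow_getD_zero (tm : List (List Int)) (cols i : Nat) :
    (pvRow tm cols i).getD 0 "0" = "0" := rfl

theorem pvRow_getD_succ (tm : List (List Int)) (cols i j : Nat) (h : j < cols) :
    (pvRow tm cols i).getD (j + 1) "0" = PySem.Int.toStr ((tm.getD i []).getD j 0) := by
  show ("0" :: ((List.range cols).map (fun j => PySem.Int.toStr ((tm.getD i []).getD j 0)) ++ ["0"])).getD (j + 1) "0" = _
  rw [List.getD_cons_succ, List.getD_append _ _ _ _ (by simpa using h)]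
  rw [List.getD_eq_getElem _ _ (by simpa using h)]
  simp

theorem pvRow_getD_end (tm : List (List Int)) (cols i : Nat) :
    (pvRow tm cols i).getD (cols + 1) "0" = "0" := by
  show ("0" :: ((List.range cols).map (fun j => PySem.Int.toStr ((tm.getD i []).getD j 0)) ++ ["0"])).getD (cols + 1) "0" = "0"
  rw [List.getD_cons_succ, List.getD_append_right _ _ _ _ (by simp)]
  simp

theorem tilemap_Borders_eq (tm : List (List Int)) :
    tilemap_Borders tm = tilemap_Borders_alt tm := by
  simp only [tilemap_Borders, tilemap_Borders_alt]
  rw [PySem.List.pyRange_zero_natCast, PySem.List.pyRange_zero_natCast]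
  simp only [List.map_map]
  set rows := tm.length with hrows
  set cols := (PySem.List.pyGetD tm 0 ([] : List Int)).length with hcols
  apply List.map_congr_left
  intro i hi
  rw [List.mem_range] at hi
  simp only [Function.comp]
  apply List.map_congr_left
  intro j hj
  rw [List.mem_range] at hj
  simp only [Function.comp]
  congr 1
  · congr 1
    · congr 1
      · -- t1 (left)
        cases j with
        | zero =>
            rw [pvP_getD_succ tm rows cols i hi, pvRow_getD_zero]
            norm_num
        | succ j' =>
            rw [pvP_getD_succ tm rows cols i hi, pvRow_getD_succ tm cols i j' (by omega)]
            rw [if_pos (by push_cast; omega)]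
            rw [show ((j' + 1 : Nat) : Int) - 1 = ((j' : Nat) : Int) by push_cast; ring]
            simp only [PySem.List.pyGetD_natCast]
      · -- t2 (top)
        cases i with
        | zero =>
            rw [pvP_getD_zero, pvPad_getD]
            norm_num
        | succ i' =>
            rw [pvP_getD_succ tm rows cols i' (by omega), pvRow_getD_succ tm cols i' j hj]
            rw [if_pos (by push_cast; omega)]
            rw [show ((i' + 1 : Nat) : Int) - 1 = ((i' : Nat) : Int) by push_cast; ring]
            simp only [PySem.List.pyGetD_natCast]
    · -- t3 (right)
      by_cases h3 : j + 1 < cols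
      · rw [show j + 2 = (j + 1) + 1 from rfl,
            pvP_getD_succ tm rows cols i hi, pvRow_getD_succ tm cols i (j + 1) h3]
        rw [if_pos (by omega)]
        rw [show ((j : Nat) : Int) + 1 = ((j + 1 : Nat) : Int) by push_cast; ring]
        simp only [PySem.List.pyGetD_natCast]
      · rw [show j + 2 = cols + 1 by omega,
            pvP_getD_succ tm rows cols i hi, pvRow_getD_end]
        rw [if_neg (by omega)]
  · -- t4 (bottom)
    by_cases h4 : i + 1 < rows
    · rw [show i + 2 = (i + 1) + 1 from rfl,
          pvP_getD_succ tm rows cols (i + 1) h4, pvRow_getD_succ tm cols (i + 1) j hj]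
      rw [if_pos (by omega)]
      rw [show ((i : Nat) : Int) + 1 = ((i + 1 : Nat) : Int) by push_cast; ring]
      simp only [PySem.List.pyGetD_natCast]
    · rw [show i + 2 = rows + 1 by omega, pvP_getD_last, pvPad_getD]
      rw [if_neg (by omega)]

-- ===== VERDICT (by name: the statement is the Claim_ definition above) =====
theorem tilemap_Borders_spec : Claim_equal_tilemap_Borders := by
  intro tm _ _
  exact tilemap_Borders_eq tm
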